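-- pv_equiv track=rewrite | github.com/pyside/pyside2-setup | tools/create_changelog.py | extract_change_log
-- ===== SOURCE A (Python) =====
-- from typing import Dict, List, Tuple
--
-- def extract_change_log(commit_message: List[str]) -> Tuple[str, List[str]]:
--     """Extract a tuple of (component, change log lines) from a commit message
--        of the form [ChangeLog][shiboken6] description..."""
--     result = []
--     component = 'pyside'
--     within_changelog = False
--     for line in commit_message:
--         if within_changelog:
--             if line:
--                 result.append('   ' + line.strip())
--             else:
--                 break
--         else:
--             if line.startswith('[ChangeLog]'):
--                 log_line = line[11:]
--                 if log_line.startswith('['):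
--                     end = log_line.find(']')
--                     if end > 0:
--                         component = log_line[1:end]
--                         log_line = log_line[end + 1:]
--                 result.append(' * ' + log_line.strip())
--                 within_changelog = True
--     return (component, result)
-- ===== SOURCE B (Python) =====
-- from typing import List, Tuple
--
--
-- def extract_change_log(commit_message: List[str]) -> Tuple[str, List[str]]:
--     """Paragraph-based: group the message into blank-line-separated paragraphs,
--        then return the tail of the first paragraph that contains a '[ChangeLog]'
--        header, starting at that header."""
--     paragraphs = []
--     current = []
--     for line in commit_message:
--         if line:
--             current.append(line)
--         else:
--             paragraphs.append(current)
--             current = []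
--     paragraphs.append(current)
--     for para in paragraphs:
--         for j, line in enumerate(para):
--             if line.startswith('[ChangeLog]'):
--                 rest = line[11:]
--                 component = 'pyside'
--                 if rest.startswith('['):
--                     end = rest.find(']')
--                     if end > 0:
--                         component = rest[1:end]
--                         rest = rest[end + 1:]
--                 return (component,
--                         [' * ' + rest.strip()]
--                         + ['   ' + l.strip() for l in para[j + 1:]])
--     return ('pyside', [])
-- ===== Notes on version B (the rewrite author's own statement) =====
-- stated objective: alternative
-- what changed: Replaced A's flag-driven single pass by a staged paragraph algorithm: first group the message into blank-line-separated paragraphs, then search for the first paragraph containing a '[ChangeLog]' header and return its tail from that header on, with the body lines mapped in a separate comprehension.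
import Mathlib
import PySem

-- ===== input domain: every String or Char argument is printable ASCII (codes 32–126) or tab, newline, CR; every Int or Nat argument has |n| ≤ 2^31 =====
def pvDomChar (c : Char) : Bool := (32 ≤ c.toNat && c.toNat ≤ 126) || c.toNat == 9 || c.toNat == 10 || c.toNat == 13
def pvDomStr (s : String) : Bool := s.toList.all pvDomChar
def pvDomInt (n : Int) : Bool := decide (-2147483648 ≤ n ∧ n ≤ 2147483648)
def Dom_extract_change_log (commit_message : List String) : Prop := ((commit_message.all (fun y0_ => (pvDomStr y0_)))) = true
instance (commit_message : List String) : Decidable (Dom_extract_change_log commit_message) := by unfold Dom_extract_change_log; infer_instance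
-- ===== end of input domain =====

-- B replaces A's flag-driven single pass by a staged paragraph grouping + search (objective: alternative).

-- ===== PORT A =====
-- A's for-loop over the lines, state = (result, component, within_changelog); branches in A's order.
def pvLoopA : List String → List String → String → Bool → String × List String
  | [], result, component, _ => (component, result)
  | line :: rest, result, component, within =>
    if within then
      if line ≠ "" then
        pvLoopA rest (result ++ ["   " ++ PySem.Str.strip line]) component true
      else (component, result)
    else
      if PySem.Str.startswith line "[ChangeLog]" then
        let log_line := PySem.Str.slice line (some 11) none
        if PySem.Str.startswith log_line "[" then
          let e := PySem.Str.find log_line "]"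
          if e > 0 then
            pvLoopA rest (result ++ [" * " ++ PySem.Str.strip (PySem.Str.slice log_line (some (e + 1)) none)])
              (PySem.Str.slice log_line (some 1) (some e)) true
          else
            pvLoopA rest (result ++ [" * " ++ PySem.Str.strip log_line]) component true
        else
          pvLoopA rest (result ++ [" * " ++ PySem.Str.strip log_line]) component true
      else pvLoopA rest result component false

def extract_change_log (commit_message : List String) : String × List String :=
  pvLoopA commit_message [] "pyside" false

-- ===== PORT B =====
-- phase 1 of Source B: group the lines into blank-line-separated paragraphs (cur = the paragraph being built)
def pvSplitParas : List String → List String → List (List String)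
  | [], cur => [cur]
  | line :: rest, cur =>
    if line ≠ "" then pvSplitParas rest (cur ++ [line])
    else cur :: pvSplitParas rest []

-- Source B's inner 'for j, line in enumerate(para)': the header line and para[j+1:], if any
def pvFindInPara : List String → Option (String × List String)
  | [] => none
  | line :: rest =>
    if PySem.Str.startswith line "[ChangeLog]" then some (line, rest)
    else pvFindInPara rest

-- Source B's outer 'for para in paragraphs': first paragraph whose scan returns
def pvSearchParas : List (List String) → Option (String × List String)
  | [] => none
  | para :: rest =>
    match pvFindInPara para with
    | some r => some r
    | none => pvSearchParas rest

-- Source B's header parsing: (component, remaining text of the header line)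
def pvParseHeader (line : String) : String × String :=
  let rest := PySem.Str.slice line (some 11) none
  if PySem.Str.startswith rest "[" then
    let e := PySem.Str.find rest "]"
    if e > 0 then
      (PySem.Str.slice rest (some 1) (some e), PySem.Str.slice rest (some (e + 1)) none)
    else ("pyside", rest)
  else ("pyside", rest)

def extract_change_log_alt (commit_message : List String) : String × List String :=
  match pvSearchParas (pvSplitParas commit_message []) with
  | none => ("pyside", [])
  | some (line, body) =>
    let p := pvParseHeader line
    (p.1, (" * " ++ PySem.Str.strip p.2) :: body.map (fun l => "   " ++ PySem.Str.strip l))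

-- ===== PRECONDITION & SPEC =====
def Spec_extract_change_log (commit_message : List String) (out : String × List String) : Prop := out = extract_change_log_alt commit_message
instance (commit_message : List String) (out : String × List String) : Decidable (Spec_extract_change_log commit_message out) := by unfold Spec_extract_change_log; infer_instance

-- ===== CLAIM (what is proved, stated in full; the proofs are below) =====
def Claim_equal_extract_change_log : Prop := ∀ (commit_message : List String), Dom_extract_change_log commit_message → Spec_extract_change_log commit_message (extract_change_log commit_message)

-- ===== LEMMAS AND PROOFS =====

-- proof-level reference: lines up to the first blank one
def pvTake : List String → List String
  | [] => []
  | line :: rest => if line = "" then [] else line :: pvTake rest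

theorem pvFindInPara_snoc (xs : List String) (y : String) :
    pvFindInPara (xs ++ [y]) =
      match pvFindInPara xs with
      | some (h, s) => some (h, s ++ [y])
      | none => if PySem.Str.startswith y "[ChangeLog]" then some (y, []) else none := by
  induction xs with
  | nil => simp [pvFindInPara]
  | cons line rest ih =>
    by_cases h : PySem.Chars.startswith line.toList
        ['[', 'C', 'h', 'a', 'n', 'g', 'e', 'L', 'o', 'g', ']'] = true
    · simp [pvFindInPara, h]
    · simp [pvFindInPara, h, ih]

-- once a header is inside cur, the search result is cur's header suffix extended to the first blank
theorem pvSearch_found (cm : List String) : ∀ (cur : List String) (h : String) (s : List String),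
    pvFindInPara cur = some (h, s) →
    pvSearchParas (pvSplitParas cm cur) = some (h, s ++ pvTake cm) := by
  induction cm with
  | nil => intro cur h s hc; simp [pvSplitParas, pvSearchParas, pvTake, hc]
  | cons line rest ih =>
    intro cur h s hc
    by_cases hl : line = ""
    · simp [pvSplitParas, pvSearchParas, pvTake, hl, hc]
    · have : pvFindInPara (cur ++ [line]) = some (h, s ++ [line]) := by
        rw [pvFindInPara_snoc, hc]
      simp [pvSplitParas, hl, ih _ _ _ this, pvTake]

-- with no header in cur, the search is the first header in cm with its tail up to the first blank
theorem pvSearch_none (cm : List String) : ∀ (cur : List String),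
    pvFindInPara cur = none →
    pvSearchParas (pvSplitParas cm cur) =
      match pvFindInPara cm with
      | none => none
      | some (h, t) => some (h, pvTake t) := by
  induction cm with
  | nil => intro cur hc; simp [pvSplitParas, pvSearchParas, pvFindInPara, hc]
  | cons line rest ih =>
    intro cur hc
    by_cases hl : line = ""
    · simp only [pvSplitParas, hl, ne_eq, not_true_eq_false, if_false, pvSearchParas, hc]
      rw [ih [] (by simp [pvFindInPara])]
      subst hl
      simp [pvFindInPara, PySem.Chars.startswith]
    · by_cases hh : PySem.Chars.startswith line.toList
          ['[', 'C', 'h', 'a', 'n', 'g', 'e', 'L', 'o', 'g', ']'] = true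
      · have : pvFindInPara (cur ++ [line]) = some (line, []) := by
          rw [pvFindInPara_snoc, hc]; simp [hh]
        simp [pvSplitParas, hl, pvSearch_found rest _ _ _ this, pvFindInPara, hh]
      · have : pvFindInPara (cur ++ [line]) = none := by
          rw [pvFindInPara_snoc, hc]; simp [hh]
        simp [pvSplitParas, hl, ih _ this, pvFindInPara, hh]

-- once within_changelog is set, A just collects lines up to the first blank one
theorem pvLoopA_within (rest : List String) : ∀ (result : List String) (component : String),
    pvLoopA rest result component true =
      (component, result ++ (pvTake rest).map (fun l => "   " ++ PySem.Str.strip l)) := by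
  induction rest with
  | nil => intro result component; simp [pvLoopA, pvTake]
  | cons line rest ih =>
    intro result component
    by_cases h : line = ""
    · simp [pvLoopA, pvTake, h]
    · simp [pvLoopA, pvTake, h, ih]

theorem pvLoopA_eq_alt (cm : List String) :
    pvLoopA cm [] "pyside" false = extract_change_log_alt cm := by
  induction cm with
  | nil => simp [pvLoopA, extract_change_log_alt, pvSplitParas, pvSearchParas, pvFindInPara]
  | cons line rest ih =>
    by_cases h : PySem.Str.startswith line "[ChangeLog]" = true
    · have hC : PySem.Chars.startswith line.toList
          ['[', 'C', 'h', 'a', 'n', 'g', 'e', 'L', 'o', 'g', ']'] = true := by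
        simpa using h
      have hne : line ≠ "" := by
        intro e; subst e; simp [PySem.Chars.startswith] at hC
      have hs : pvFindInPara [line] = some (line, []) := by
        simp [pvFindInPara, hC]
      simp only [extract_change_log_alt]
      rw [show pvSplitParas (line :: rest) [] = pvSplitParas rest [line] from by
        simp [pvSplitParas, hne]]
      rw [pvSearch_found rest [line] line [] hs]
      simp only [pvLoopA, Bool.false_eq_true, if_false]
      rw [if_pos h]
      unfold pvParseHeader
      split_ifs <;> simp_all [pvLoopA_within] <;> (rw [if_neg (by omega)]; simp)
    · have hC : PySem.Chars.startswith line.toList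
          ['[', 'C', 'h', 'a', 'n', 'g', 'e', 'L', 'o', 'g', ']'] = false := by
        simpa using h
      simp only [pvLoopA, Bool.false_eq_true, if_false]
      rw [if_neg h, ih]
      by_cases hl : line = ""
      · simp only [extract_change_log_alt]
        rw [show pvSplitParas (line :: rest) [] = [] :: pvSplitParas rest [] from by
          simp [pvSplitParas, hl]]
        simp [pvSearchParas, pvFindInPara]
      · simp only [extract_change_log_alt]
        rw [show pvSplitParas (line :: rest) [] = pvSplitParas rest [line] from by
          simp [pvSplitParas, hl]]
        rw [pvSearch_none rest [line] (by simp [pvFindInPara, hC]),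
            pvSearch_none rest [] (by simp [pvFindInPara])]

-- ===== VERDICT (by name: the statement is the Claim_ definition above) =====
theorem extract_change_log_spec : Claim_equal_extract_change_log := by
  intro cm _
  show extract_change_log cm = extract_change_log_alt cm
  exact pvLoopA_eq_alt cm
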